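-- pv_equiv track=rewrite | github.com/ben0x01/coin_scrapper | main.py | extract_project_links
-- ===== SOURCE A (Python) =====
-- def extract_project_links(pair):
--     project_website = None
--     project_twitter = None
--     project_telegram = None
--
--     if 'info' in pair:
--         if 'websites' in pair['info']:
--             websites = pair['info']['websites']
--             for website in websites:
--                 if website['label'].lower() == 'website':
--                     project_website = website['url']
--                     break
--         if 'socials' in pair['info']:
--             socials = pair['info']['socials']
--             for social in socials:
--                 if social['type'].lower() == 'twitter':
--                     project_twitter = social['url']
--                 elif social['type'].lower() == 'telegram':
--                     project_telegram = social['url']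
--
--     return project_website, project_twitter, project_telegram
-- ===== SOURCE B (Python) =====
-- def _first_url(items, key, value):
--     for item in items:
--         if item[key].lower() == value:
--             return item['url']
--     return None
--
--
-- def extract_project_links(pair):
--     info = pair.get('info', {})
--     socials_last_first = info.get('socials', [])[::-1]
--     return (_first_url(info.get('websites', []), 'label', 'website'),
--             _first_url(socials_last_first, 'type', 'twitter'),
--             _first_url(socials_last_first, 'type', 'telegram'))
-- ===== Notes on version B (the rewrite author's own statement) =====
-- stated objective: simpler
-- what changed: Replaces A's forward scan with mutable overwrite accumulators by one generic first-match helper applied three times, running it over the REVERSED socials list so A's last-wins overwrite becomes an early-exit first match; no accumulators or branches remain.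
import Mathlib
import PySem

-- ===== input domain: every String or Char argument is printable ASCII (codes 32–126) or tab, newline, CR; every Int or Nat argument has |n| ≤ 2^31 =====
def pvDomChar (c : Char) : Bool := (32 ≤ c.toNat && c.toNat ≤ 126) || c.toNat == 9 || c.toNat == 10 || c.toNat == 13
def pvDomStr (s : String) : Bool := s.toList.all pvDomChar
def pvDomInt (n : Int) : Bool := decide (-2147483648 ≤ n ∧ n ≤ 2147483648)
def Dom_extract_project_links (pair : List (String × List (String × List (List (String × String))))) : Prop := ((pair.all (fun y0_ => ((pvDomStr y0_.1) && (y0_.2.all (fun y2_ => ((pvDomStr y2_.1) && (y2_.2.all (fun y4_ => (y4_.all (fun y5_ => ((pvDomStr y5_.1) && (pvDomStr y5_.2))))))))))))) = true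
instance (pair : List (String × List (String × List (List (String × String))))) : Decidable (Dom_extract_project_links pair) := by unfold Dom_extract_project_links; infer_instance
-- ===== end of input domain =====

-- B replaces A's mutable overwrite accumulators by one generic first-match helper run over the
-- reversed socials list (last-wins becomes first match); return value only, no argument is mutated.

-- Python dict lookup d[k] / d.get(k) on an association list (first match); shared dictionary primitive of both ports.
def pvALook {V : Type} (d : List (String × V)) (k : String) : Option V :=
  match d with
  | [] => none
  | (k', v) :: rest => if k' == k then some v else pvALook rest k

-- ===== PORT A =====
-- the 'for website in websites: … break' loop
def pvFindWebsiteA (ws : List (List (String × String))) : Option String :=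
  match ws with
  | [] => none
  | w :: rest =>
    match pvALook w "label" with
    | none => none  -- KeyError 'label' (excluded by Pre_)
    | some lbl =>
      if PySem.Str.lower lbl == "website" then pvALook w "url" else pvFindWebsiteA rest

-- the 'for social in socials' loop with its two accumulators
def pvSocialLoopA (ss : List (List (String × String))) (tw tg : Option String) :
    Option String × Option String :=
  match ss with
  | [] => (tw, tg)
  | s :: rest =>
    match pvALook s "type" with
    | none => (tw, tg)  -- KeyError 'type' (excluded by Pre_)
    | some t =>
      if PySem.Str.lower t == "twitter" then pvSocialLoopA rest (pvALook s "url") tg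
      else if PySem.Str.lower t == "telegram" then pvSocialLoopA rest tw (pvALook s "url")
      else pvSocialLoopA rest tw tg

def extract_project_links (pair : List (String × List (String × List (List (String × String))))) : Option String × Option String × Option String :=
  match pvALook pair "info" with
  | none => (none, none, none)
  | some info =>
    let pw := match pvALook info "websites" with
      | none => none
      | some ws => pvFindWebsiteA ws
    let st := match pvALook info "socials" with
      | none => (none, none)
      | some ss => pvSocialLoopA ss none none
    (pw, st.1, st.2)

-- ===== PORT B =====
-- _first_url(items, key, value): return the 'url' of the first item whose item[key].lower() == value
def pvFirstUrl (items : List (List (String × String))) (key : String) (value : String) : Option String :=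
  match items with
  | [] => none
  | it :: rest =>
    match pvALook it key with
    | none => none  -- KeyError key (excluded by Pre_)
    | some v =>
      if PySem.Str.lower v == value then pvALook it "url" else pvFirstUrl rest key value

def extract_project_links_alt (pair : List (String × List (String × List (List (String × String))))) : Option String × Option String × Option String :=
  let info := (pvALook pair "info").getD []
  let socials_last_first := ((pvALook info "socials").getD []).reverse
  (pvFirstUrl ((pvALook info "websites").getD []) "label" "website",
   pvFirstUrl socials_last_first "type" "twitter",
   pvFirstUrl socials_last_first "type" "telegram")

-- ===== PRECONDITION & SPEC =====
-- Pre_ excludes exactly the inputs on which A raises KeyError: the first website the scan stops at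
-- (missing 'label' or matching label) must have both keys, every social must have 'type', and every
-- twitter/telegram social must have 'url'; nothing A returns a value on is excluded.
def pvPreB (pair : List (String × List (String × List (List (String × String))))) : Bool :=
  match List.lookup "info" pair with
  | none => true
  | some info =>
    (match List.lookup "websites" info with
     | none => true
     | some ws =>
       match ws.find? (fun w => (List.lookup "label" w).isNone
           || (PySem.Str.lower ((List.lookup "label" w).getD "") == "website")) with
       | none => true
       | some w => (List.lookup "label" w).isSome && (List.lookup "url" w).isSome) &&
    (match List.lookup "socials" info with
     | none => true
     | some ss => ss.all (fun s =>
         match List.lookup "type" s with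
         | none => false
         | some t => (!(PySem.Str.lower t == "twitter") && !(PySem.Str.lower t == "telegram"))
             || (List.lookup "url" s).isSome))

def Pre_extract_project_links (pair : List (String × List (String × List (List (String × String))))) : Prop :=
  pvPreB pair = true
instance (pair : List (String × List (String × List (List (String × String))))) : Decidable (Pre_extract_project_links pair) := by unfold Pre_extract_project_links; infer_instance

def pvWitness_extract_project_links : (List (String × List (String × List (List (String × String))))) :=
  [("info", [("websites", [[("label", "Website"), ("url", "https://w")]]),
             ("socials", [[("type", "Twitter"), ("url", "https://t")],
                          [("type", "telegram"), ("url", "https://g")]])])]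

def Spec_extract_project_links (pair : List (String × List (String × List (List (String × String))))) (out : Option String × Option String × Option String) : Prop := out = extract_project_links_alt pair
instance (pair : List (String × List (String × List (List (String × String))))) (out : Option String × Option String × Option String) : Decidable (Spec_extract_project_links pair out) := by unfold Spec_extract_project_links; infer_instance

-- ===== CLAIM (what is proved, stated in full; the proofs are below) =====
def Claim_equal_extract_project_links : Prop := ∀ (pair : List (String × List (String × List (List (String × String))))), Dom_extract_project_links pair → Pre_extract_project_links pair → Spec_extract_project_links pair (extract_project_links pair)

-- ===== LEMMAS AND PROOFS =====

-- the ports' dict primitive is the standard first-match association lookup Pre_ is phrased with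
theorem pvALook_eq_lookup {V : Type} (d : List (String × V)) (k : String) :
    pvALook d k = List.lookup k d := by
  induction d with
  | nil => rfl
  | cons p rest ih =>
    cases p with
    | mk k' v =>
      simp only [pvALook, List.lookup, ih, BEq.comm]
      cases k == k' <;> rfl

-- A's break-loop over websites is B's generic first-match helper at key 'label', value 'website'.
theorem pvFindWebsiteA_eq (ws : List (List (String × String))) :
    pvFindWebsiteA ws = pvFirstUrl ws "label" "website" := by
  induction ws with
  | nil => rfl
  | cons w rest ih =>
    simp only [pvFindWebsiteA, pvFirstUrl, ih]

-- the per-social obligation Pre_'s socials clause states, via pvALook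
def pvOkS (v : String) (s : List (String × String)) : Prop :=
  ∃ t, pvALook s "type" = some t ∧ ((PySem.Str.lower t == v) = true → (pvALook s "url").isSome = true)

-- appending one social at the back: the front part wins, else the new element's contribution
theorem pvFirstUrl_append_single (l : List (List (String × String))) (s : List (String × String))
    (v t : String) (ht : pvALook s "type" = some t)
    (h : ∀ x ∈ l, pvOkS v x) :
    pvFirstUrl (l ++ [s]) "type" v
      = Option.or (pvFirstUrl l "type" v)
          (if PySem.Str.lower t == v then pvALook s "url" else none) := by
  induction l with
  | nil => simp [pvFirstUrl, ht]
  | cons a l ih =>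
    obtain ⟨ta, hta, hua⟩ := h a (by simp)
    have ih' := ih (fun x hx => h x (List.mem_cons_of_mem _ hx))
    cases hm : (PySem.Str.lower ta == v) with
    | true =>
      obtain ⟨u, hu⟩ := Option.isSome_iff_exists.mp (hua hm)
      simp [pvFirstUrl, hta, hm, hu]
    | false =>
      simp [pvFirstUrl, hta, hm, ih']

-- A's accumulator loop equals first match on the reversed list, when Pre_'s socials clause holds.
theorem pvSocialLoopA_eq (ss : List (List (String × String))) (tw tg : Option String)
    (h : ∀ s ∈ ss, pvOkS "twitter" s ∧ pvOkS "telegram" s) :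
    pvSocialLoopA ss tw tg
      = (Option.or (pvFirstUrl ss.reverse "type" "twitter") tw,
         Option.or (pvFirstUrl ss.reverse "type" "telegram") tg) := by
  induction ss generalizing tw tg with
  | nil => simp [pvSocialLoopA, pvFirstUrl]
  | cons s rest ih =>
    obtain ⟨⟨t, ht, hutw⟩, ⟨t', ht', hutg⟩⟩ := h s (by simp)
    rw [ht'] at ht; injection ht with ht; subst ht
    have hrest : ∀ x ∈ rest, pvOkS "twitter" x ∧ pvOkS "telegram" x :=
      fun x hx => h x (List.mem_cons_of_mem _ hx)
    have hrtw : ∀ x ∈ rest.reverse, pvOkS "twitter" x := by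
      intro x hx; exact (hrest x (List.mem_reverse.mp hx)).1
    have hrtg : ∀ x ∈ rest.reverse, pvOkS "telegram" x := by
      intro x hx; exact (hrest x (List.mem_reverse.mp hx)).2
    have hrev : (s :: rest).reverse = rest.reverse ++ [s] := by simp
    rw [hrev,
        pvFirstUrl_append_single rest.reverse s "twitter" t' ht' hrtw,
        pvFirstUrl_append_single rest.reverse s "telegram" t' ht' hrtg]
    cases h1 : (PySem.Str.lower t' == "twitter") with
    | true =>
      have hne : (PySem.Str.lower t' == "telegram") = false := by
        have := eq_of_beq h1; rw [this]; rfl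
      obtain ⟨u, hu⟩ := Option.isSome_iff_exists.mp (hutw h1)
      simp only [pvSocialLoopA, ht', h1, if_true]
      rw [ih _ _ hrest]
      simp [hne, hu]
    | false =>
      cases h2 : (PySem.Str.lower t' == "telegram") with
      | true =>
        obtain ⟨u, hu⟩ := Option.isSome_iff_exists.mp (hutg h2)
        simp only [pvSocialLoopA, ht', h1, h2, Bool.false_eq_true, if_false, if_true]
        rw [ih _ _ hrest]
        simp [hu]
      | false =>
        simp only [pvSocialLoopA, ht', h1, h2, Bool.false_eq_true, if_false]
        rw [ih _ _ hrest]
        simp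

-- Pre_'s socials clause, element by element, in the form the loop lemma consumes
theorem pvOk_of_all (ss : List (List (String × String)))
    (hps : (ss.all (fun s =>
        match pvALook s "type" with
        | none => false
        | some t => (!(PySem.Str.lower t == "twitter") && !(PySem.Str.lower t == "telegram"))
            || (pvALook s "url").isSome)) = true) :
    ∀ s ∈ ss, pvOkS "twitter" s ∧ pvOkS "telegram" s := by
  intro s hs
  have h := List.all_eq_true.mp hps s hs
  cases htl : pvALook s "type" with
  | none => rw [htl] at h; simp at h
  | some t =>
    rw [htl] at h
    simp only [Bool.or_eq_true, Bool.and_eq_true, Bool.not_eq_true'] at h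
    rcases h with ⟨h1, h2⟩ | h3
    · exact ⟨⟨t, htl, fun hm => by rw [hm] at h1; simp at h1⟩,
             ⟨t, htl, fun hm => by rw [hm] at h2; simp at h2⟩⟩
    · exact ⟨⟨t, htl, fun _ => h3⟩, ⟨t, htl, fun _ => h3⟩⟩

-- ===== VERDICT (by name: the statement is the Claim_ definition above) =====
theorem extract_project_links_spec : Claim_equal_extract_project_links := by
  intro pair _hdom hpre
  unfold Spec_extract_project_links
  unfold Pre_extract_project_links pvPreB at hpre
  simp only [← pvALook_eq_lookup] at hpre
  unfold extract_project_links extract_project_links_alt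
  cases hinfo : pvALook pair "info" with
  | none => simp [pvALook, pvFirstUrl]
  | some info =>
    simp only [hinfo, Option.getD_some] at hpre ⊢
    obtain ⟨hpw, hps⟩ := (Bool.and_eq_true _ _).mp hpre
    have hW : (match pvALook info "websites" with
          | none => (none : Option String)
          | some ws => pvFindWebsiteA ws)
        = pvFirstUrl ((pvALook info "websites").getD []) "label" "website" := by
      cases hw : pvALook info "websites" with
      | none => simp [pvFirstUrl]
      | some ws => simp [pvFindWebsiteA_eq]
    have hS : (match pvALook info "socials" with
          | none => ((none : Option String), (none : Option String))
          | some ss => pvSocialLoopA ss none none)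
        = (pvFirstUrl ((pvALook info "socials").getD []).reverse "type" "twitter",
           pvFirstUrl ((pvALook info "socials").getD []).reverse "type" "telegram") := by
      cases hq : pvALook info "socials" with
      | none => simp [pvFirstUrl]
      | some ss =>
        simp only [hq] at hps
        rw [show (match some ss with
            | none => ((none : Option String), (none : Option String))
            | some ss => pvSocialLoopA ss none none) = pvSocialLoopA ss none none from rfl,
            pvSocialLoopA_eq ss none none (pvOk_of_all ss hps)]
        simp
    rw [hW, hS]
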